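-- pv_equiv track=rewrite | github.com/MisaelMQ/dqn_agent_torch_g5 | dqn_stage_nav_torch/dqn_stage_nav_torch/train_node.py | build_curriculum_by_difficulty
-- ===== SOURCE A (Python) =====
-- def build_curriculum_by_difficulty(goals_data, order=("easy", "medium", "hard")):
--     buckets = {d: [] for d in order}
--     for xy, diff in goals_data:
--         if diff in buckets:
--             buckets[diff].append((xy, diff))
--     curriculum = []
--     for d in order:
--         curriculum.extend(buckets[d])
--     return curriculum
-- ===== SOURCE B (Python) =====
-- def build_curriculum_by_difficulty(goals_data, order=("easy", "medium", "hard")):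
--     return [(xy, diff) for d in order for xy, diff in goals_data if diff == d]
-- ===== Notes on version B (the rewrite author's own statement) =====
-- stated objective: simpler
-- what changed: Replaces the bucket-dictionary build-then-concatenate with a single nested comprehension that rescans goals_data once per difficulty in order.
import Mathlib
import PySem

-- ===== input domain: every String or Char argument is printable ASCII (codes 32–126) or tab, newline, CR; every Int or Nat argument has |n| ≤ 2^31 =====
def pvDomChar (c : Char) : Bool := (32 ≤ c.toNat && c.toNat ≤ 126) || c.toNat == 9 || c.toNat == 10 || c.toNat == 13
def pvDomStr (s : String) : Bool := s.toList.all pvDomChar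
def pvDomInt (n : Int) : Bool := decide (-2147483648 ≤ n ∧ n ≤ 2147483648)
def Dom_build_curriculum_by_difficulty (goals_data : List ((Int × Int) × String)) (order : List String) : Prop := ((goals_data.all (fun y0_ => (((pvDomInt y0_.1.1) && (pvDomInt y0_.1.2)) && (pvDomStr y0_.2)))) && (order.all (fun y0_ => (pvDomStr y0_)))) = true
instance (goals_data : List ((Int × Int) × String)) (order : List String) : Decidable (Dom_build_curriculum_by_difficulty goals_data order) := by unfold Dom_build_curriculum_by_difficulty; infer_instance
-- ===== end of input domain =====

-- B drops A's bucket dictionary: it rescans goals_data once per difficulty in order (simpler, same return value).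

-- ===== PORT A =====
def build_curriculum_by_difficulty (goals_data : List ((Int × Int) × String)) (order : List String) : List ((Int × Int) × String) :=
  -- buckets = {d: [] for d in order}
  let buckets0 : PySem.Dict String (List ((Int × Int) × String)) :=
    order.foldl (fun b d => b.insert d []) PySem.Dict.empty
  -- for xy, diff in goals_data: if diff in buckets: buckets[diff].append((xy, diff))
  let buckets :=
    goals_data.foldl
      (fun b p => if b.contains p.2 then b.modify p.2 [] (· ++ [(p.1, p.2)]) else b) buckets0
  -- curriculum = []; for d in order: curriculum.extend(buckets[d])
  -- (buckets[d] always exists since d ∈ order; getD is exact here)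
  order.foldl (fun acc d => acc ++ buckets.getD d []) []

-- ===== PORT B =====
def build_curriculum_by_difficulty_alt (goals_data : List ((Int × Int) × String)) (order : List String) : List ((Int × Int) × String) :=
  order.flatMap (fun d => (goals_data.filter (fun g => g.2 == d)).map (fun g => (g.1, g.2)))

-- ===== PRECONDITION & SPEC =====
def Spec_build_curriculum_by_difficulty (goals_data : List ((Int × Int) × String)) (order : List String) (out : List ((Int × Int) × String)) : Prop := out = build_curriculum_by_difficulty_alt goals_data order
instance (goals_data : List ((Int × Int) × String)) (order : List String) (out : List ((Int × Int) × String)) : Decidable (Spec_build_curriculum_by_difficulty goals_data order out) := by unfold Spec_build_curriculum_by_difficulty; infer_instance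

-- ===== CLAIM (what is proved, stated in full; the proofs are below) =====
def Claim_equal_build_curriculum_by_difficulty : Prop := ∀ (goals_data : List ((Int × Int) × String)) (order : List String), Dom_build_curriculum_by_difficulty goals_data order → Spec_build_curriculum_by_difficulty goals_data order (build_curriculum_by_difficulty goals_data order)

-- ===== LEMMAS AND PROOFS =====

-- the fill loop, seen through getD at a key the dict already contains: it appends exactly the matching goals
theorem bcbd_loop_getD (l : List ((Int × Int) × String))
    (b : PySem.Dict String (List ((Int × Int) × String))) (d : String)
    (hd : b.contains d = true) :
    (l.foldl (fun b p => if b.contains p.2 then b.modify p.2 [] (· ++ [(p.1, p.2)]) else b) b).getD d []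
      = b.getD d [] ++ l.filter (fun g => g.2 == d) := by
  induction l generalizing b with
  | nil => simp
  | cons p l ih =>
    simp only [List.foldl_cons, List.filter_cons]
    by_cases hpd : p.2 = d
    · subst hpd
      rw [if_pos hd, ih _ (by simp [PySem.Dict.contains_modify, hd])]
      simp [PySem.Dict.getD_modify_self]
    · by_cases hc : b.contains p.2 = true
      · rw [if_pos hc, ih _ (by simp [PySem.Dict.contains_modify, hd])]
        have hne : d ≠ p.2 := Ne.symm hpd
        simp [PySem.Dict.getD_modify, hne, hpd]
      · rw [if_neg (by simp [hc]), ih _ hd]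
        simp [hpd]
  
-- the initial dict {d: [] for d in order}: contains every d ∈ order, and every bucket is []
theorem bcbd_init_contains (order : List String) (b : PySem.Dict String (List ((Int × Int) × String)))
    (d : String) (hd : d ∈ order ∨ b.contains d = true) :
    (order.foldl (fun b d => b.insert d []) b).contains d = true := by
  induction order generalizing b with
  | nil => simpa using hd
  | cons o os ih =>
    simp only [List.foldl_cons]
    apply ih
    rcases hd with h | h
    · rcases List.mem_cons.mp h with h | h
      · right; subst h; simp
      · left; exact h
    · right; simp [PySem.Dict.contains_insert, h]

theorem bcbd_init_getD (order : List String) (b : PySem.Dict String (List ((Int × Int) × String)))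
    (hb : ∀ k, b.getD k [] = []) (d : String) :
    (order.foldl (fun b d => b.insert d []) b).getD d [] = [] := by
  induction order generalizing b with
  | nil => exact hb d
  | cons o os ih =>
    simp only [List.foldl_cons]
    exact ih _ (fun k => by rw [PySem.Dict.getD_insert]; split <;> simp [hb])

-- ===== VERDICT (by name: the statement is the Claim_ definition above) =====
theorem build_curriculum_by_difficulty_spec : Claim_equal_build_curriculum_by_difficulty := by
  intro goals_data order _
  unfold Spec_build_curriculum_by_difficulty build_curriculum_by_difficulty build_curriculum_by_difficulty_alt
  rw [PySem.List.foldl_congr_mem' (g := fun acc d =>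
        acc ++ (goals_data.filter (fun g => g.2 == d)).map (fun g => (g.1, g.2)))
      (h := by
        intro d hd acc
        congr 1
        rw [bcbd_loop_getD _ _ _ (bcbd_init_contains order _ d (Or.inl hd)),
            bcbd_init_getD order _ (fun k => by simp [PySem.Dict.getD_empty])]
        simp)]
  simpa using PySem.List.foldl_append_eq_flatMap
    (fun d => (goals_data.filter (fun g => g.2 == d)).map (fun g => (g.1, g.2))) order []
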